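-- pv_equiv track=rewrite | github.com/mithracodes/phazed | Q4.py | phazed_score
-- ===== SOURCE A (Python) =====
-- def phazed_score(hand):
--     """ Accepts a list of cards that the current player holds in their hand in
--     the form of a 2-element string as input and returns the score for the hand
--     in the form of a non-negative integer as output """
--
--     score = 0
--
--     # Create a dictionary with values for each card based on its first element
--     values = {"2": 2, "3": 3, "4": 4, "5": 5, "6": 6, "7": 7, "8": 8, "9": 9,
--               "0": 10, "J": 11, "Q": 12, "K": 13, "A": 25}
--
--     if hand != []:
--         # Find first element of each card in list
--         first_val = [i[0] for i in hand]
--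
--         # Find corresponding value of card and add to total score
--         for val in first_val:
--             if val in values.keys():
--                 score = score + int(values[val])
--         return score
--     return 0
-- ===== SOURCE B (Python) =====
-- def phazed_score(hand):
--     """ Accepts a list of cards that the current player holds in their hand in
--     the form of a 2-element string as input and returns the score for the hand
--     in the form of a non-negative integer as output """
--
--     firsts = [card[0] for card in hand]
--     return (2 * firsts.count("2") + 3 * firsts.count("3")
--             + 4 * firsts.count("4") + 5 * firsts.count("5")
--             + 6 * firsts.count("6") + 7 * firsts.count("7")
--             + 8 * firsts.count("8") + 9 * firsts.count("9")
--             + 10 * firsts.count("0") + 11 * firsts.count("J")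
--             + 12 * firsts.count("Q") + 13 * firsts.count("K")
--             + 25 * firsts.count("A"))
-- ===== Notes on version B (the rewrite author's own statement) =====
-- stated objective: alternative
-- what changed: B drops A's value dictionary and per-card membership-test loop entirely: it computes the score as a closed-form weighted sum of the thirteen rank occurrence counts (one .count per rank), with no special case for the empty hand.
import Mathlib
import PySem

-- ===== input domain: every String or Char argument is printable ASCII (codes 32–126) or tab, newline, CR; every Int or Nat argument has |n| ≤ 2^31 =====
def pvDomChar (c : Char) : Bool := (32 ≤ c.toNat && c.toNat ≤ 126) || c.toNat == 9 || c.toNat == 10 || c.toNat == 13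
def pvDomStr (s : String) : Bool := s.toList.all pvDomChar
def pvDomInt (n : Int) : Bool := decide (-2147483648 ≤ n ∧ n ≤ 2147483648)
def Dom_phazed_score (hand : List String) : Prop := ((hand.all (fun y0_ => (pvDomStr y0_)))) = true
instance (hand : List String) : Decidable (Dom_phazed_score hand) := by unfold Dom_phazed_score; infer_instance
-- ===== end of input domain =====

-- B replaces A's value dictionary and per-card membership-test-and-add loop (with its empty-hand
-- special case) by a closed-form weighted sum of the thirteen rank occurrence counts (alternative
-- decomposition, same asymptotic cost).


-- ===== PORT A =====
-- the card-value dictionary A writes out literally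
def cardValues : PySem.Dict Char Int :=
  PySem.Dict.ofList [('2', 2), ('3', 3), ('4', 4), ('5', 5), ('6', 6), ('7', 7), ('8', 8),
                     ('9', 9), ('0', 10), ('J', 11), ('Q', 12), ('K', 13), ('A', 25)]

-- card[0] / i[0]; under Pre_ (no empty strings) pyGet? is always `some`, the default is never read
def firstChar (s : String) : Char := (PySem.Str.pyGet? s 0).getD ' '

def phazed_score (hand : List String) : Int :=
  if hand ≠ [] then
    let first_val := hand.map firstChar
    first_val.foldl (fun score val =>
      if cardValues.contains val then score + cardValues.getD val 0 else score) 0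
  else 0

-- ===== PORT B =====
def phazed_score_alt (hand : List String) : Int :=
  let firsts := hand.map firstChar
  2 * (firsts.count '2' : Int) + 3 * (firsts.count '3' : Int)
    + 4 * (firsts.count '4' : Int) + 5 * (firsts.count '5' : Int)
    + 6 * (firsts.count '6' : Int) + 7 * (firsts.count '7' : Int)
    + 8 * (firsts.count '8' : Int) + 9 * (firsts.count '9' : Int)
    + 10 * (firsts.count '0' : Int) + 11 * (firsts.count 'J' : Int)
    + 12 * (firsts.count 'Q' : Int) + 13 * (firsts.count 'K' : Int)
    + 25 * (firsts.count 'A' : Int)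

-- ===== PRECONDITION & SPEC =====
-- Pre_ excludes hands containing an empty string: there both Pythons raise IndexError on card[0].
def Pre_phazed_score (hand : List String) : Prop := "" ∉ hand
instance (hand : List String) : Decidable (Pre_phazed_score hand) := by
  unfold Pre_phazed_score; infer_instance
def pvWitness_phazed_score : List String := ["2H", "AS", "0D", "xZ"]

def Spec_phazed_score (hand : List String) (out : Int) : Prop := out = phazed_score_alt hand
instance (hand : List String) (out : Int) : Decidable (Spec_phazed_score hand out) := by
  unfold Spec_phazed_score; infer_instance

-- ===== CLAIM (what is proved, stated in full; the proofs are below) =====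
def Claim_equal_phazed_score : Prop := ∀ (hand : List String), Dom_phazed_score hand → Pre_phazed_score hand → Spec_phazed_score hand (phazed_score hand)

-- ===== LEMMAS AND PROOFS =====

-- B's closed form as a function of the list of rank characters
def weightedCounts (l : List Char) : Int :=
  2 * (l.count '2' : Int) + 3 * (l.count '3' : Int) + 4 * (l.count '4' : Int)
    + 5 * (l.count '5' : Int) + 6 * (l.count '6' : Int) + 7 * (l.count '7' : Int)
    + 8 * (l.count '8' : Int) + 9 * (l.count '9' : Int) + 10 * (l.count '0' : Int)
    + 11 * (l.count 'J' : Int) + 12 * (l.count 'Q' : Int) + 13 * (l.count 'K' : Int)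
    + 25 * (l.count 'A' : Int)

theorem cardValues_mk : cardValues = PySem.Dict.mk
    [('2', 2), ('3', 3), ('4', 4), ('5', 5), ('6', 6), ('7', 7), ('8', 8),
     ('9', 9), ('0', 10), ('J', 11), ('Q', 12), ('K', 13), ('A', 25)] := by rfl

-- adding one character to the front adds exactly its dictionary value (0 if absent)
theorem weightedCounts_cons (a : Char) (t : List Char) :
    weightedCounts (a :: t)
      = weightedCounts t + (if cardValues.contains a then cardValues.getD a 0 else 0) := by
  by_cases h2 : a = '2'
  · subst h2
    rw [show (if cardValues.contains '2' then cardValues.getD '2' 0 else (0:Int)) = 2 from by decide]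
    simp [weightedCounts]; ring
  by_cases h3 : a = '3'
  · subst h3
    rw [show (if cardValues.contains '3' then cardValues.getD '3' 0 else (0:Int)) = 3 from by decide]
    simp [weightedCounts]; ring
  by_cases h4 : a = '4'
  · subst h4
    rw [show (if cardValues.contains '4' then cardValues.getD '4' 0 else (0:Int)) = 4 from by decide]
    simp [weightedCounts]; ring
  by_cases h5 : a = '5'
  · subst h5
    rw [show (if cardValues.contains '5' then cardValues.getD '5' 0 else (0:Int)) = 5 from by decide]
    simp [weightedCounts]; ring
  by_cases h6 : a = '6'
  · subst h6
    rw [show (if cardValues.contains '6' then cardValues.getD '6' 0 else (0:Int)) = 6 from by decide]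
    simp [weightedCounts]; ring
  by_cases h7 : a = '7'
  · subst h7
    rw [show (if cardValues.contains '7' then cardValues.getD '7' 0 else (0:Int)) = 7 from by decide]
    simp [weightedCounts]; ring
  by_cases h8 : a = '8'
  · subst h8
    rw [show (if cardValues.contains '8' then cardValues.getD '8' 0 else (0:Int)) = 8 from by decide]
    simp [weightedCounts]; ring
  by_cases h9 : a = '9'
  · subst h9
    rw [show (if cardValues.contains '9' then cardValues.getD '9' 0 else (0:Int)) = 9 from by decide]
    simp [weightedCounts]; ring
  by_cases h0 : a = '0'
  · subst h0
    rw [show (if cardValues.contains '0' then cardValues.getD '0' 0 else (0:Int)) = 10 from by decide]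
    simp [weightedCounts]; ring
  by_cases hJ : a = 'J'
  · subst hJ
    rw [show (if cardValues.contains 'J' then cardValues.getD 'J' 0 else (0:Int)) = 11 from by decide]
    simp [weightedCounts]; ring
  by_cases hQ : a = 'Q'
  · subst hQ
    rw [show (if cardValues.contains 'Q' then cardValues.getD 'Q' 0 else (0:Int)) = 12 from by decide]
    simp [weightedCounts]; ring
  by_cases hK : a = 'K'
  · subst hK
    rw [show (if cardValues.contains 'K' then cardValues.getD 'K' 0 else (0:Int)) = 13 from by decide]
    simp [weightedCounts]; ring
  by_cases hA : a = 'A'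
  · subst hA
    rw [show (if cardValues.contains 'A' then cardValues.getD 'A' 0 else (0:Int)) = 25 from by decide]
    simp [weightedCounts]; ring
  have hc : cardValues.contains a = false := by
    rw [cardValues_mk]
    simp [PySem.Dict.contains_mk, Ne.symm h2, Ne.symm h3, Ne.symm h4, Ne.symm h5, Ne.symm h6,
      Ne.symm h7, Ne.symm h8, Ne.symm h9, Ne.symm h0, Ne.symm hJ, Ne.symm hQ, Ne.symm hK,
      Ne.symm hA]
  simp [weightedCounts, hc, h2, h3, h4, h5, h6, h7, h8, h9, h0, hJ, hQ, hK, hA]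

-- A's conditional-accumulate loop computes the weighted-count closed form
theorem foldl_eq_weightedCounts (l : List Char) (c : Int) :
    l.foldl (fun score val =>
        if cardValues.contains val then score + cardValues.getD val 0 else score) c
      = c + weightedCounts l := by
  induction l generalizing c with
  | nil => simp [weightedCounts]
  | cons a t ih =>
    rw [List.foldl_cons, weightedCounts_cons]
    by_cases h : cardValues.contains a
    · rw [if_pos h, if_pos h, ih]; ring
    · rw [if_neg h, if_neg h, ih]; ring
-- ===== VERDICT (by name: the statement is the Claim_ definition above) =====
theorem phazed_score_spec : Claim_equal_phazed_score := by
  intro hand _ _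
  unfold Spec_phazed_score phazed_score phazed_score_alt
  by_cases hne : hand = []
  · subst hne; rfl
  · simp only [hne, ne_eq, not_false_iff, if_true]
    rw [foldl_eq_weightedCounts, zero_add]
    rfl
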